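-- pv_equiv track=rewrite | github.com/PeterDieter/AmazonChallenge | src/build/helpFunctions.py | zoneDistanceMatrixMinMin
-- ===== SOURCE A (Python) =====
-- def zoneDistanceMatrixMinMin(ttMatrix, stopsData, zoneListName):
--     distMat = {}
--     for _fromZone in zoneListName:
--         distMat[_fromZone] = {}
--         for _toZone in zoneListName:
--             if _fromZone == _toZone:
--                 distMat[_fromZone][_toZone] = 0
--             else:
--                 totalDist = 0
--                 stopsFromZone = [v["StopName"] for v in stopsData.values() if _fromZone in v.values()]
--                 stopsToZone = [v["StopName"] for v in stopsData.values() if _toZone in v.values()]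
--                 dist = 10000000000000000
--                 for fromStop in stopsFromZone:
--                     for toStop in stopsToZone:
--                         if ttMatrix[fromStop][toStop] < dist:
--                             dist = ttMatrix[fromStop][toStop]
--                 distMat[_fromZone][_toZone] = int(dist)
--
--     return distMat
-- ===== SOURCE B (Python) =====
-- def zoneDistanceMatrixMinMin(ttMatrix, stopsData, zoneListName):
--     big = 10000000000000000
--     zones = list(dict.fromkeys(zoneListName))
--     zoneStops = {z: [] for z in zones}
--     for v in stopsData.values():
--         vals = list(v.values())
--         for z in zones:
--             if z in vals:
--                 zoneStops[z].append(v["StopName"])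
--     return {z1: {z2: (0 if z1 == z2 else
--                       int(min((ttMatrix[s1][s2]
--                                for s1 in zoneStops[z1] for s2 in zoneStops[z2]),
--                               default=big)))
--                  for z2 in zones}
--             for z1 in zones}
-- ===== Notes on version B (the rewrite author's own statement) =====
-- stated objective: faster
-- what changed: B builds the zone-to-stops index once in a single pass over stopsData and takes min() with a default over the stop-pair list, instead of A's re-filtering of all of stopsData for every ordered zone pair.
-- outside the precondition, e.g. on zoneDistanceMatrixMinMin({}, {'s': {'x': 'a'}}, ['a']): A returns {'a': {'a': 0}}, B raises KeyError
import Mathlib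
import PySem

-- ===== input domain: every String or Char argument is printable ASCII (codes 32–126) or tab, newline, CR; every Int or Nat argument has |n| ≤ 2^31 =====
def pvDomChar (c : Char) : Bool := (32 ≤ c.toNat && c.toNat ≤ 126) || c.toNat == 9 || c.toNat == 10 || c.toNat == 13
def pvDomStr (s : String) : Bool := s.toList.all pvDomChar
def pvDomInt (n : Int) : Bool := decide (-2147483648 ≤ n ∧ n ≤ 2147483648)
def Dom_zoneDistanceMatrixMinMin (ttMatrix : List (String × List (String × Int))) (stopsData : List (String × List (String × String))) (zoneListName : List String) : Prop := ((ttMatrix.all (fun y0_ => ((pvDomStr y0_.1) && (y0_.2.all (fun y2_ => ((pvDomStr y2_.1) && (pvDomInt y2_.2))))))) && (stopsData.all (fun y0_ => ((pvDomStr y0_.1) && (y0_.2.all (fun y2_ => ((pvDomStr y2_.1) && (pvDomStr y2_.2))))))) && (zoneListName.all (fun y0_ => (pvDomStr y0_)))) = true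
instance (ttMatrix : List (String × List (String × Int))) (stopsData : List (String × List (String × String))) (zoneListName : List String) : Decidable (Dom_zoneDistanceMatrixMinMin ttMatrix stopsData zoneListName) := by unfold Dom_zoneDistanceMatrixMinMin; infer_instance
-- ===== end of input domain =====

-- B builds the zone→stops index ONCE in a single pass over stopsData instead of A's re-filtering
-- of stopsData for every ordered zone pair, and takes min() over the pair list; objective: faster
-- (removes the per-pair rescans).

-- shared primitive accessors (both Pythons contain these very expressions)
def pvName (v : List (String × String)) : String := PySem.Dict.getD (PySem.Dict.mk v) "StopName" ""
def pvVals (v : List (String × String)) : List String := PySem.Dict.values (PySem.Dict.mk v)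
def pvTT (ttMatrix : List (String × List (String × Int))) (s1 s2 : String) : Int :=
  PySem.Dict.getD (PySem.Dict.mk (PySem.Dict.getD (PySem.Dict.mk ttMatrix) s1 [])) s2 0
def pvBig : Int := 10000000000000000

-- ===== PORT A =====
def zoneDistanceMatrixMinMin (ttMatrix : List (String × List (String × Int))) (stopsData : List (String × List (String × String))) (zoneListName : List String) : List (String × List (String × Int)) :=
  (zoneListName.foldl
    (fun distMat fromZone =>
      distMat.insert fromZone
        ((zoneListName.foldl
          (fun row toZone =>
            row.insert toZone
              (if fromZone == toZone then (0 : Int)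
               else
                 let stopsFromZone := ((PySem.Dict.values (PySem.Dict.mk stopsData)).filter
                     (fun v => (pvVals v).contains fromZone)).map pvName
                 let stopsToZone := ((PySem.Dict.values (PySem.Dict.mk stopsData)).filter
                     (fun v => (pvVals v).contains toZone)).map pvName
                 stopsFromZone.foldl
                   (fun dist fromStop =>
                     stopsToZone.foldl
                       (fun dist toStop =>
                         if pvTT ttMatrix fromStop toStop < dist then pvTT ttMatrix fromStop toStop
                         else dist)
                       dist)
                   pvBig))
          PySem.Dict.empty).items))
    (PySem.Dict.empty : PySem.Dict String (List (String × Int)))).items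

-- ===== PORT B =====
def pvZoneStops (stopsData : List (String × List (String × String))) (zones : List String) : PySem.Dict String (List String) :=
  (PySem.Dict.values (PySem.Dict.mk stopsData)).foldl
    (fun d v =>
      zones.foldl
        (fun d z => if (pvVals v).contains z then d.modify z [] (fun l => l ++ [pvName v]) else d)
        d)
    (zones.foldl (fun d z => d.insert z ([] : List String)) PySem.Dict.empty)

def zoneDistanceMatrixMinMin_alt (ttMatrix : List (String × List (String × Int))) (stopsData : List (String × List (String × String))) (zoneListName : List String) : List (String × List (String × Int)) :=
  let zones := PySem.List.dedup zoneListName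
  let zoneStops := pvZoneStops stopsData zones
  zones.map (fun z1 =>
    (z1, zones.map (fun z2 =>
      (z2, if z1 == z2 then (0 : Int)
           else
             PySem.List.minD
                 ((zoneStops.getD z1 []).flatMap (fun s1 =>
                   (zoneStops.getD z2 []).map (fun s2 => pvTT ttMatrix s1 s2))) id pvBig))))

-- ===== PRECONDITION & SPEC =====
-- Pre_ excludes exactly the inputs where the Python raises a KeyError: a stop record matching
-- some listed zone but lacking the "StopName" key (A raises whenever two distinct zones are
-- listed; B, which indexes the stops once, also raises when only one distinct zone is listed —
-- that single-zone corner is the only excluded input on which A still returns, see cites), and a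
-- ttMatrix missing an entry for a stop pair that belongs to two distinct listed zones.
def Pre_zoneDistanceMatrixMinMin (ttMatrix : List (String × List (String × Int))) (stopsData : List (String × List (String × String))) (zoneListName : List String) : Prop :=
  (∀ v ∈ PySem.Dict.values (PySem.Dict.mk stopsData),
      (∃ z ∈ zoneListName, (pvVals v).contains z = true) →
      ((PySem.Dict.mk v).get? "StopName").isSome = true)
  ∧ (∀ z1 ∈ zoneListName, ∀ z2 ∈ zoneListName, z1 ≠ z2 →
      ∀ v1 ∈ PySem.Dict.values (PySem.Dict.mk stopsData),
      ∀ v2 ∈ PySem.Dict.values (PySem.Dict.mk stopsData),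
        (pvVals v1).contains z1 = true → (pvVals v2).contains z2 = true →
        ((PySem.Dict.mk (PySem.Dict.getD (PySem.Dict.mk ttMatrix) (pvName v1) [])).get? (pvName v2)).isSome = true)
instance (ttMatrix : List (String × List (String × Int))) (stopsData : List (String × List (String × String))) (zoneListName : List String) : Decidable (Pre_zoneDistanceMatrixMinMin ttMatrix stopsData zoneListName) := by unfold Pre_zoneDistanceMatrixMinMin; infer_instance

def pvWitness_zoneDistanceMatrixMinMin : (List (String × List (String × Int))) × (List (String × List (String × String))) × List String :=
  ([("a", [("a", 0), ("b", 3)]), ("b", [("a", 2), ("b", 0)])],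
   [("s1", [("StopName", "a"), ("Z", "z1")]), ("s2", [("StopName", "b"), ("Z", "z2")])],
   ["z1", "z2"])

def Spec_zoneDistanceMatrixMinMin (ttMatrix : List (String × List (String × Int))) (stopsData : List (String × List (String × String))) (zoneListName : List String) (out : List (String × List (String × Int))) : Prop := out = zoneDistanceMatrixMinMin_alt ttMatrix stopsData zoneListName
instance (ttMatrix : List (String × List (String × Int))) (stopsData : List (String × List (String × String))) (zoneListName : List String) (out : List (String × List (String × Int))) : Decidable (Spec_zoneDistanceMatrixMinMin ttMatrix stopsData zoneListName out) := by unfold Spec_zoneDistanceMatrixMinMin; infer_instance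

-- ===== CLAIM (what is proved, stated in full; the proofs are below) =====
def Claim_equal_zoneDistanceMatrixMinMin : Prop := ∀ (ttMatrix : List (String × List (String × Int))) (stopsData : List (String × List (String × String))) (zoneListName : List String), Dom_zoneDistanceMatrixMinMin ttMatrix stopsData zoneListName → Pre_zoneDistanceMatrixMinMin ttMatrix stopsData zoneListName → Spec_zoneDistanceMatrixMinMin ttMatrix stopsData zoneListName (zoneDistanceMatrixMinMin ttMatrix stopsData zoneListName)

-- ===== LEMMAS AND PROOFS =====

-- Python's min(l, default=b) versus A's running-minimum loop, when every element is below b.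
lemma pv_min?_cons (x : Int) (xs : List Int) :
    PySem.List.min? (x :: xs) id = some (xs.foldl (fun m t => if t < m then t else m) x) := by
  induction xs generalizing x with
  | nil => simp [PySem.List.min?]
  | cons a as ih =>
    have h1 : PySem.List.min? (x :: a :: as) id = PySem.List.min? ((if a < x then a else x) :: as) id := by
      by_cases h : a < x <;> simp [PySem.List.min?, h]
    rw [h1, ih]
    simp only [List.foldl_cons]

lemma pv_foldl_min_eq (l : List Int) (b : Int) (h : ∀ t ∈ l, t < b) :
    l.foldl (fun dist t => if t < dist then t else dist) b = PySem.List.minD l id b := by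
  cases l with
  | nil => rfl
  | cons x xs =>
    have hx : x < b := h x (by simp)
    simp only [PySem.List.minD, pv_min?_cons, Option.getD_some, List.foldl_cons, if_pos hx]

-- nested min-loop over two lists = min-loop over the flattened pair list
lemma pv_foldl_flatMap {α β γ : Type} (l : List α) (g : α → List β) (f : γ → β → γ) (i : γ) :
    (l.flatMap g).foldl f i = l.foldl (fun a x => (g x).foldl f a) i := by
  induction l generalizing i with
  | nil => rfl
  | cons x xs ih => simp [List.foldl_append, ih]

-- the travel-time lookup (defaulted where Python would raise) is always below the sentinel on Dom
lemma pv_tt_lt_big (ttM : List (String × List (String × Int)))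
    (h : ∀ p ∈ ttM, ∀ q ∈ p.2, pvDomInt q.2 = true) (s1 s2 : String) :
    pvTT ttM s1 s2 < pvBig := by
  unfold pvTT pvBig
  rcases hrow : (PySem.Dict.mk ttM).get? s1 with _ | r
  · rw [PySem.Dict.getD_of_get?_eq_none _ _ hrow]
    have h0 : PySem.Dict.mk ([] : List (String × Int)) = PySem.Dict.empty := rfl
    rw [h0, PySem.Dict.getD_empty]
    norm_num
  · rw [PySem.Dict.getD_of_get?_eq_some _ _ hrow]
    have hrmem : (s1, r) ∈ ttM := PySem.Dict.mem_items_of_get?_eq_some _ hrow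
    rcases hq : (PySem.Dict.mk r).get? s2 with _ | w
    · rw [PySem.Dict.getD_of_get?_eq_none _ _ hq]; norm_num
    · rw [PySem.Dict.getD_of_get?_eq_some _ _ hq]
      have hwmem : (s2, w) ∈ r := PySem.Dict.mem_items_of_get?_eq_some _ hq
      have := h _ hrmem _ hwmem
      simp only [pvDomInt, decide_eq_true_eq] at this
      omega

-- ---- pvZoneStops computes exactly A's filtered stop-name lists ----

lemma pv_inner_untouched (p : String → Bool) (nm : String) (l : List String) (z : String)
    (hz : z ∉ l) (d : PySem.Dict String (List String)) :
    (l.foldl (fun d z' => if p z' then d.modify z' [] (fun s => s ++ [nm]) else d) d).getD z []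
      = d.getD z [] := by
  induction l generalizing d with
  | nil => rfl
  | cons a as ih =>
    have hza : z ≠ a := fun h => hz (h ▸ List.mem_cons_self ..)
    have hzas : z ∉ as := fun h => hz (List.mem_cons_of_mem _ h)
    simp only [List.foldl_cons]
    rw [ih hzas]
    split_ifs with hp
    · exact PySem.Dict.getD_modify_of_ne d [] _ hza
    · rfl

lemma pv_inner_step (p : String → Bool) (nm : String) (zs : List String) (hnd : zs.Nodup)
    (z : String) (hz : z ∈ zs) (d : PySem.Dict String (List String)) :
    (zs.foldl (fun d z' => if p z' then d.modify z' [] (fun s => s ++ [nm]) else d) d).getD z []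
      = if p z then d.getD z [] ++ [nm] else d.getD z [] := by
  induction zs generalizing d with
  | nil => exact absurd hz (List.not_mem_nil)
  | cons a as ih =>
    rcases List.nodup_cons.mp hnd with ⟨hna, hnd'⟩
    simp only [List.foldl_cons]
    by_cases hza : z = a
    · subst hza
      have hzas : z ∉ as := hna
      rw [pv_inner_untouched p nm as z hzas]
      split_ifs with hp
      · exact PySem.Dict.getD_modify_self d z [] _
      · rfl
    · have hzas : z ∈ as := by
        rcases List.mem_cons.mp hz with h | h
        · exact absurd h hza
        · exact h
      have hda : (if p a = true then d.modify a [] (fun s => s ++ [nm]) else d).getD z []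
          = d.getD z [] := by
        split_ifs with hp
        · exact PySem.Dict.getD_modify_of_ne d [] _ hza
        · rfl
      rw [ih hnd' hzas, hda]

lemma pv_zoneStops_init (zs : List String) (z : String) (d : PySem.Dict String (List String))
    (hd : d.getD z [] = []) :
    (zs.foldl (fun d z' => d.insert z' ([] : List String)) d).getD z [] = [] := by
  induction zs generalizing d with
  | nil => exact hd
  | cons a as ih =>
    simp only [List.foldl_cons]
    apply ih
    by_cases hza : z = a
    · subst hza; simp [PySem.Dict.getD_insert_self]
    · rw [PySem.Dict.getD_insert_of_ne d _ _ hza]; exact hd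

lemma pv_outer (zs : List String) (hnd : zs.Nodup) (z : String) (hz : z ∈ zs)
    (vs : List (List (String × String))) (d : PySem.Dict String (List String)) :
    (vs.foldl
        (fun d v =>
          zs.foldl
            (fun d z' => if (pvVals v).contains z' then d.modify z' [] (fun l => l ++ [pvName v]) else d)
            d)
        d).getD z []
      = d.getD z [] ++ (vs.filter (fun v => (pvVals v).contains z)).map pvName := by
  induction vs generalizing d with
  | nil => simp
  | cons v vt ih =>
    simp only [List.foldl_cons]
    rw [ih]
    rw [pv_inner_step (fun z' => (pvVals v).contains z') (pvName v) zs hnd z hz d]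
    by_cases hc : z ∈ pvVals v <;> simp [hc, List.append_assoc]

lemma pv_zoneStops_getD (sd : List (String × List (String × String))) (zs : List String)
    (hnd : zs.Nodup) (z : String) (hz : z ∈ zs) :
    (pvZoneStops sd zs).getD z []
      = ((PySem.Dict.values (PySem.Dict.mk sd)).filter (fun v => (pvVals v).contains z)).map pvName := by
  unfold pvZoneStops
  rw [pv_outer zs hnd z hz]
  rw [pv_zoneStops_init zs z PySem.Dict.empty (by simp [PySem.Dict.getD_empty])]
  simp

-- ---- a fold of inserts with a value that is a function of the key, as an items list ----

lemma pv_get?_insert_not_mem {ν : Type} (v : String → ν) (l : List String) (k : String)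
    (hk : k ∉ l) (d : PySem.Dict String ν) :
    (l.foldl (fun d x => d.insert x (v x)) d).get? k = d.get? k := by
  induction l generalizing d with
  | nil => rfl
  | cons a as ih =>
    have hka : k ≠ a := fun h => hk (h ▸ List.mem_cons_self ..)
    have hkas : k ∉ as := fun h => hk (List.mem_cons_of_mem _ h)
    simp only [List.foldl_cons]
    rw [ih hkas, PySem.Dict.get?_insert_of_ne _ _ hka]

lemma pv_get?_insert_mem {ν : Type} (v : String → ν) (l : List String) (k : String)
    (hk : k ∈ l) (d : PySem.Dict String ν) :
    (l.foldl (fun d x => d.insert x (v x)) d).get? k = some (v k) := by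
  induction l generalizing d with
  | nil => exact absurd hk (List.not_mem_nil)
  | cons a as ih =>
    simp only [List.foldl_cons]
    by_cases hkas : k ∈ as
    · exact ih hkas _
    · have hka : k = a := by
        rcases List.mem_cons.mp hk with h | h
        · exact h
        · exact absurd h hkas
      subst hka
      rw [pv_get?_insert_not_mem v as k hkas, PySem.Dict.get?_insert_self]

lemma pv_items_foldl_insert {ν : Type} (v : String → ν) (l : List String) :
    (l.foldl (fun d x => d.insert x (v x)) PySem.Dict.empty).items
      = (PySem.Set.ofList l).map (fun x => (x, v x)) := by
  cases l with
  | nil => rfl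
  | cons k0 rest =>
    have hkeys : ((k0 :: rest).foldl (fun d x => d.insert x (v x)) PySem.Dict.empty).keys
        = PySem.Set.ofList (k0 :: rest) := by
      rw [PySem.Dict.keys_foldl_insert (k0 :: rest) (fun _ x => v x) PySem.Dict.empty,
        PySem.Dict.keys_empty, PySem.Set.update_nil_left]
    have hnd : ((k0 :: rest).foldl (fun d x => d.insert x (v x)) PySem.Dict.empty).keys.Nodup := by
      rw [hkeys]; exact PySem.Set.nodup_ofList _
    rw [PySem.Dict.items_eq_map_keys _ hnd (v k0), hkeys]
    apply List.map_congr_left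
    intro x hx
    have hxl : x ∈ (k0 :: rest) := (PySem.Set.mem_ofList _ _).mp hx
    rw [PySem.Dict.getD_of_get?_eq_some _ _ (pv_get?_insert_mem v _ x hxl _)]

-- ---- the per-cell values agree ----

lemma pv_cell_eq (ttM : List (String × List (String × Int)))
    (sd : List (String × List (String × String)))
    (hb : ∀ s1 s2, pvTT ttM s1 s2 < pvBig)
    (zs : List String) (hnd : zs.Nodup) (z1 z2 : String) (h1 : z1 ∈ zs) (h2 : z2 ∈ zs) :
    (((PySem.Dict.values (PySem.Dict.mk sd)).filter (fun v => (pvVals v).contains z1)).map pvName).foldl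
        (fun dist fromStop =>
          (((PySem.Dict.values (PySem.Dict.mk sd)).filter (fun v => (pvVals v).contains z2)).map pvName).foldl
            (fun dist toStop =>
              if pvTT ttM fromStop toStop < dist then pvTT ttM fromStop toStop else dist)
            dist)
        pvBig
      = PySem.List.minD
            (((pvZoneStops sd zs).getD z1 []).flatMap (fun s1 =>
              ((pvZoneStops sd zs).getD z2 []).map (fun s2 => pvTT ttM s1 s2))) id pvBig := by
  rw [pv_zoneStops_getD sd zs hnd z1 h1, pv_zoneStops_getD sd zs hnd z2 h2]
  have hbound : ∀ t ∈ (((PySem.Dict.values (PySem.Dict.mk sd)).filter (fun v => (pvVals v).contains z1)).map pvName).flatMap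
      (fun s1 => (((PySem.Dict.values (PySem.Dict.mk sd)).filter (fun v => (pvVals v).contains z2)).map pvName).map
        (fun s2 => pvTT ttM s1 s2)), t < pvBig := by
    intro t ht
    rcases List.mem_flatMap.mp ht with ⟨s1, _, ht2⟩
    rcases List.mem_map.mp ht2 with ⟨s2, _, rfl⟩
    exact hb s1 s2
  rw [← pv_foldl_min_eq _ pvBig hbound, pv_foldl_flatMap]
  simp only [List.foldl_map]

-- ===== VERDICT (by name: the statement is the Claim_ definition above) =====
theorem zoneDistanceMatrixMinMin_spec : Claim_equal_zoneDistanceMatrixMinMin := by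
  intro ttM sd zl hDom _hPre
  have hDom' : ∀ p ∈ ttM, ∀ q ∈ p.2, pvDomInt q.2 = true := by
    unfold Dom_zoneDistanceMatrixMinMin at hDom
    simp only [Bool.and_eq_true, List.all_eq_true] at hDom
    intro p hp q hq
    exact ((hDom.1.1 p hp).2 q hq).2
  have hb : ∀ s1 s2, pvTT ttM s1 s2 < pvBig := fun s1 s2 => pv_tt_lt_big ttM hDom' s1 s2
  unfold Spec_zoneDistanceMatrixMinMin
  simp only [zoneDistanceMatrixMinMin, zoneDistanceMatrixMinMin_alt, PySem.List.dedup]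
  rw [pv_items_foldl_insert]
  apply List.map_congr_left
  intro z1 hz1
  rw [pv_items_foldl_insert]
  refine congrArg (fun r => (z1, r)) ?_
  apply List.map_congr_left
  intro z2 hz2
  refine congrArg (fun r => (z2, r)) ?_
  by_cases hzz : z1 == z2
  · simp [hzz]
  · simp only [hzz, if_false, Bool.false_eq_true]
    exact pv_cell_eq ttM sd hb (PySem.Set.ofList zl) (PySem.Set.nodup_ofList _) z1 z2 hz1 hz2
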